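-- pv_equiv track=rewrite | github.com/GongyuanCao/poker | p3ws/11_subseq/maxseq.py | maxSeq
-- ===== SOURCE A (Python) =====
-- def maxSeq(list):
--     flag = [0 for n in range(len(list) + 1)]
--     big = -9999
--     if list == None:
--         return flag[0]
--     if list == []:
--         return flag[0]
--     for i in range(1, len(list) + 1):
--         cur = list[i-1]
--         if cur > big:
--             flag[i] = flag[i-1] + 1
--             big = cur
--             pass
--         else:
--             flag[i] = 1
--             big = cur
--             pass
--         pass
--     ans = max(flag)
--     return ans
-- ===== SOURCE B (Python) =====
-- def maxSeq(list):
--     # segment-boundary approach: find the indices where the strict increase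
--     # breaks, then the answer is the widest gap between consecutive boundaries
--     if not list:
--         return 0
--     n = len(list)
--     bounds = [0] + [i for i in range(1, n) if list[i - 1] >= list[i]] + [n]
--     return max(b - a for a, b in zip(bounds, bounds[1:]))
-- ===== Notes on version B (the rewrite author's own statement) =====
-- stated objective: alternative
-- what changed: A fills an (n+1)-slot flag array of running run-lengths in an index loop with a 'big' sentinel and takes max(flag); B instead computes the break indices where the strict increase fails, forms the boundary list of start, breaks and end, and returns the widest gap between consecutive boundaries (the longest strictly-increasing segment).
import Mathlib
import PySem

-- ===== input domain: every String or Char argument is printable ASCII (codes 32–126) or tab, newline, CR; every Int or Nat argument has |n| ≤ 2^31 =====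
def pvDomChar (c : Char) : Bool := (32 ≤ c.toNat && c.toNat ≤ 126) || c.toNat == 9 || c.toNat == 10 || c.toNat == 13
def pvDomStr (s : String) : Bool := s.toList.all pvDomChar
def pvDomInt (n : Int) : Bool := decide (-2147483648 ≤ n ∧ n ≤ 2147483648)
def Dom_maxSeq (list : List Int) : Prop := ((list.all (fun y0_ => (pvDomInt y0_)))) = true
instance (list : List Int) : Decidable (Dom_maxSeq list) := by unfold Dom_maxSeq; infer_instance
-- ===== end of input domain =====

-- B replaces A's flag-array accumulator loop by a segment-boundary computation (break indices, then widest gap); objective: alternative.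
-- (Python A raises TypeError on None input; that value is unrepresentable for a List Int argument and not modelled here.)

-- ===== PORT A =====
-- loop body: cur = list[i-1]; flag[i] = flag[i-1]+1 if cur > big else 1; big = cur
def maxSeqBody (list : List Int) (st : List Int × Int) (i : Int) : List Int × Int :=
  let cur := PySem.List.pyGetD list (i - 1) 0
  if cur > st.2 then
    (st.1.set i.toNat (PySem.List.pyGetD st.1 (i - 1) 0 + 1), cur)
  else
    (st.1.set i.toNat 1, cur)

def maxSeq (list : List Int) : Int :=
  let flag : List Int := (List.range (list.length + 1)).map (fun _ => 0)
  let big : Int := -9999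
  -- 'if list == None' is unrepresentable for a List Int argument; 'if list == []':
  if list = [] then PySem.List.pyGetD flag 0 0
  else
    let st := (PySem.List.pyRange 1 ((list.length : Int) + 1) 1).foldl (maxSeqBody list) (flag, big)
    match PySem.List.max? st.1 (fun y => y) with
    | some m => m
    | none => 0

-- ===== PORT B =====
def maxSeq_alt (list : List Int) : Int :=
  if list = [] then 0
  else
    let n : Int := list.length
    let bounds : List Int :=
      0 :: ((PySem.List.pyRange 1 n 1).filter
        (fun i => decide (PySem.List.pyGetD list (i - 1) 0 ≥ PySem.List.pyGetD list i 0)) ++ [n])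
    match PySem.List.max? ((bounds.zip bounds.tail).map (fun p => p.2 - p.1)) (fun y => y) with
    | some m => m
    | none => 0

-- ===== PRECONDITION & SPEC =====
def Spec_maxSeq (list : List Int) (out : Int) : Prop := out = maxSeq_alt list
instance (list : List Int) (out : Int) : Decidable (Spec_maxSeq list out) := by unfold Spec_maxSeq; infer_instance

-- ===== CLAIM =====
def Claim_equal_maxSeq : Prop := ∀ (list : List Int), Dom_maxSeq list → Spec_maxSeq list (maxSeq list)

-- ===== LEMMAS AND PROOFS =====

-- A-side run-length scan: (run lengths, final prev, final run value)
def RS (p r : Int) : List Int → List Int × Int × Int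
  | [] => ([], p, r)
  | x :: xs =>
    let r' := if x > p then r + 1 else 1
    let t := RS x r' xs
    (r' :: t.1, t.2)

theorem RS_length (p r : Int) (xs : List Int) : (RS p r xs).1.length = xs.length := by
  induction xs generalizing p r with
  | nil => rfl
  | cons x xs ih => simp [RS, ih]

theorem RS_last (p r : Int) (xs : List Int) :
    (r :: (RS p r xs).1)[xs.length]? = some (RS p r xs).2.2 := by
  induction xs generalizing p r with
  | nil => rfl
  | cons x xs ih => simpa [RS] using ih x (if x > p then r + 1 else 1)

theorem maxSeq_inv (list : List Int) (k : Nat) (hk : k ≤ list.length) :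
    (PySem.List.pyRange 1 ((k : Int) + 1) 1).foldl (maxSeqBody list)
        (List.replicate (list.length + 1) 0, -9999)
      = ((0 :: (RS (-9999) 0 (list.take k)).1) ++ List.replicate (list.length - k) 0,
         (RS (-9999) 0 (list.take k)).2.1) := by
  induction k with
  | zero =>
    simp [PySem.List.pyRange_one_eq_nil, RS, List.replicate_succ]
  | succ k ih =>
    have hk' : k ≤ list.length := Nat.le_of_succ_le hk
    have hkl : k < list.length := hk
    have hcast : ((k + 1 : Nat) : Int) + 1 = ((k : Int) + 1) + 1 := by push_cast; ring
    rw [hcast, PySem.List.pyRange_one_succ_right (by omega), List.foldl_append, ih hk']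
    simp only [List.foldl_cons, List.foldl_nil]
    set runs := (RS (-9999) 0 (list.take k)).1 with hruns
    have hlen : runs.length = k := by
      rw [hruns, RS_length, List.length_take]; omega
    have hlen1 : (0 :: runs : List Int).length = k + 1 := by simp [hlen]
    have hcur : PySem.List.pyGetD list (((k : Int) + 1) - 1) 0 = list[k] := by
      have : ((k : Int) + 1) - 1 = (k : Int) := by ring
      rw [this, PySem.List.pyGetD_natCast, List.getD_eq_getElem list 0 hkl]
    have hread : PySem.List.pyGetD ((0 :: runs) ++ List.replicate (list.length - k) 0) (((k : Int) + 1) - 1) 0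
        = (RS (-9999) 0 (list.take k)).2.2 := by
      have h1 : ((k : Int) + 1) - 1 = (k : Int) := by ring
      rw [h1, PySem.List.pyGetD_natCast, List.getD_append _ _ _ _ (by omega)]
      have h2 := RS_last (-9999) 0 (list.take k)
      simp only [List.length_take, Nat.min_eq_left hk'] at h2
      rw [List.getD_eq_getElem?_getD, hruns, h2]; rfl
    have htoNat : ((k : Int) + 1).toNat = k + 1 := by omega
    have hrep : list.length - k = (list.length - (k + 1)) + 1 := by omega
    have hset : ∀ v : Int, (((0 :: runs) ++ List.replicate (list.length - k) 0).set (k + 1) v)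
        = (0 :: (runs ++ [v])) ++ List.replicate (list.length - (k + 1)) 0 := by
      intro v
      rw [List.set_append_right _ _ (by omega), hrep, List.replicate_succ]
      simp [hlen1]
    have htake : list.take (k + 1) = list.take k ++ [list[k]] := by
      rw [List.take_add_one]
      simp [List.getElem?_eq_getElem hkl]
    have hRSapp : ∀ (p r : Int) (ys : List Int) (z : Int),
        RS p r (ys ++ [z]) =
          ((RS p r ys).1 ++ [if z > (RS p r ys).2.1 then (RS p r ys).2.2 + 1 else 1], z,
            if z > (RS p r ys).2.1 then (RS p r ys).2.2 + 1 else 1) := by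
      intro p r ys
      induction ys generalizing p r with
      | nil => simp [RS]
      | cons y ys ih => intro z; simp [RS, ih]
    rw [htake, hRSapp]
    simp only [maxSeqBody, hcur, hread, htoNat, hset]
    split_ifs with h1
    · simp [hruns]
    · simp [hruns]

theorem RS_first (p x : Int) (xs : List Int) :
    (RS p 0 (x :: xs)).1 = 1 :: (RS x 1 xs).1 := by
  simp only [RS]
  split_ifs <;> rfl

-- the common reference: segment lengths / max segment length of prev-prefixed scan
def segLens (p c : Int) : List Int → List Int
  | [] => [c]
  | y :: ys => if p < y then segLens y (c + 1) ys else c :: segLens y 1 ys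

def segMax (p c : Int) : List Int → Int
  | [] => c
  | y :: ys => if p < y then segMax y (c + 1) ys else max c (segMax y 1 ys)

theorem foldl_max_max (l : List Int) : ∀ a b : Int,
    l.foldl max (max a b) = max a (l.foldl max b) := by
  induction l with
  | nil => intro a b; rfl
  | cons x l ih =>
    intro a b
    simp only [List.foldl_cons, max_assoc, ih]

theorem RS_foldl_max (xs : List Int) : ∀ p c : Int,
    (RS p c xs).1.foldl max c = segMax p c xs := by
  induction xs with
  | nil => intro p c; rfl
  | cons y ys ih =>
    intro p c
    by_cases h : y > p
    · have h' : p < y := h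
      simp only [RS, segMax, if_pos h', List.foldl_cons,
        show max c (c + 1) = c + 1 by omega]
      exact ih y (c + 1)
    · have h' : ¬ p < y := h
      simp only [RS, segMax, if_neg h', List.foldl_cons]
      rw [show max c 1 = max c 1 from rfl, foldl_max_max, ih y 1]

theorem segLens_ne_nil (xs : List Int) : ∀ p c : Int, segLens p c xs ≠ [] := by
  induction xs with
  | nil => intro p c; simp [segLens]
  | cons y ys ih =>
    intro p c
    by_cases h : p < y <;> simp [segLens, h, ih]

theorem segLens_max (xs : List Int) : ∀ p c : Int,
    (segLens p c xs).tail.foldl max (segLens p c xs).headI = segMax p c xs := by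
  induction xs with
  | nil => intro p c; rfl
  | cons y ys ih =>
    intro p c
    by_cases h : p < y
    · simp only [segLens, segMax, if_pos h]; exact ih y (c + 1)
    · simp only [segLens, segMax, if_neg h, List.headI_cons, List.tail_cons]
      cases hL : segLens y 1 ys with
      | nil => exact absurd hL (segLens_ne_nil ys y 1)
      | cons d r =>
        have := ih y 1
        rw [hL] at this
        simp only [List.headI_cons, List.tail_cons] at this
        rw [List.foldl_cons, show max c d = max c d from rfl, foldl_max_max, this]

theorem segLens_inc (ys : List Int) : ∀ p c : Int,
    segLens p (c + 1) ys = ((segLens p c ys).headI + 1) :: (segLens p c ys).tail := by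
  induction ys with
  | nil => intro p c; simp [segLens]
  | cons y ys ih =>
    intro p c
    by_cases h : p < y
    · simp only [segLens, if_pos h]; exact ih y (c + 1)
    · simp [segLens, if_neg h]

-- B-side: break indices and boundary gaps
def breaks (l : List Int) : List Int :=
  (PySem.List.pyRange 1 (l.length : Int) 1).filter
    (fun i => decide (PySem.List.pyGetD l (i - 1) 0 ≥ PySem.List.pyGetD l i 0))

def gaps (p : Int) : List Int → Int → List Int
  | [], n => [n - p]
  | b :: bs, n => (b - p) :: gaps b bs n

theorem zip_diffs_eq_gaps (bs : List Int) : ∀ p n : Int,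
    (((p :: (bs ++ [n])).zip (bs ++ [n])).map (fun q => q.2 - q.1)) = gaps p bs n := by
  induction bs with
  | nil => intro p n; simp [gaps]
  | cons b bs ih => intro p n; simp [gaps, ih b n]

theorem gaps_shift (bs : List Int) : ∀ p n : Int,
    gaps (p + 1) (bs.map (· + 1)) (n + 1) = gaps p bs n := by
  induction bs with
  | nil => intro p n; simp [gaps]
  | cons b bs ih => intro p n; simp [gaps, ih b n]

theorem gaps_inc (bs : List Int) (p n : Int) :
    gaps p (bs.map (· + 1)) (n + 1) = ((gaps p bs n).headI + 1) :: (gaps p bs n).tail := by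
  cases bs with
  | nil => simp [gaps]; ring
  | cons b bs => simp [gaps, gaps_shift]; ring

theorem breaks_cons (x y : Int) (t : List Int) :
    breaks (x :: y :: t) = (if x ≥ y then [1] else []) ++ (breaks (y :: t)).map (· + 1) := by
  unfold breaks
  have hlen2 : ((x :: y :: t).length : Int) = (t.length : Int) + 2 := by simp; ring
  have hlen1 : ((y :: t).length : Int) = (t.length : Int) + 1 := by simp
  rw [hlen2, hlen1, PySem.List.pyRange_one, PySem.List.pyRange_one]
  have h2 : ((t.length : Int) + 2 - 1).toNat = t.length + 1 := by omega
  have h1 : ((t.length : Int) + 1 - 1).toNat = t.length := by omega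
  rw [h2, h1, List.range_succ_eq_map]
  simp only [List.map_cons, List.map_map, List.filter_cons]
  have hhead : (decide (PySem.List.pyGetD (x :: y :: t) ((1 : Int) + ((0:Nat) : Int) - 1) 0
      ≥ PySem.List.pyGetD (x :: y :: t) ((1 : Int) + ((0:Nat) : Int)) 0)) = decide (x ≥ y) := by
    norm_num [PySem.List.pyGetD]
  rw [List.filter_map, List.filter_map]
  have hpred : (List.range t.length).filter
        ((fun i => decide (PySem.List.pyGetD (x :: y :: t) (i - 1) 0 ≥ PySem.List.pyGetD (x :: y :: t) i 0))
          ∘ ((fun k : Nat => (1 : Int) + (k : Int)) ∘ Nat.succ))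
      = (List.range t.length).filter
        ((fun i => decide (PySem.List.pyGetD (y :: t) (i - 1) 0 ≥ PySem.List.pyGetD (y :: t) i 0))
          ∘ (fun k : Nat => (1 : Int) + (k : Int))) := by
    apply List.filter_congr
    intro k _
    simp only [Function.comp]
    have e2 : (1 : Int) + (Nat.succ k : Nat) = ((k + 2 : Nat) : Int) := by omega
    have e4 : (1 : Int) + (k : Nat) = ((k + 1 : Nat) : Int) := by omega
    have e5 : ((k + 1 : Nat) : Int) - 1 = ((k : Nat) : Int) := by omega
    have e6 : ((k + 2 : Nat) : Int) - 1 = ((k + 1 : Nat) : Int) := by omega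
    simp only [e2, e4, e5, e6, PySem.List.pyGetD_natCast]
    have g1 : (x :: y :: t).getD (k + 1) 0 = (y :: t).getD k 0 := rfl
    have g2 : (x :: y :: t).getD (k + 2) 0 = (y :: t).getD (k + 1) 0 := rfl
    rw [g1, g2]
  rw [hpred]
  have hmap : ∀ L : List Nat,
      L.map ((fun k : Nat => (1 : Int) + (k : Int)) ∘ Nat.succ)
        = (L.map (fun k : Nat => (1 : Int) + (k : Int))).map (· + 1) := by
    intro L
    rw [List.map_map]
    apply List.map_congr_left
    intro k _
    simp only [Function.comp]
    push_cast
    ring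
  rw [hmap]
  simp only [hhead]
  by_cases h : x ≥ y <;> simp [h]

theorem breaks_gaps (t : List Int) : ∀ x : Int,
    gaps 0 (breaks (x :: t)) ((x :: t).length : Int) = segLens x 1 t := by
  induction t with
  | nil =>
    intro x
    have : breaks [x] = [] := by
      unfold breaks
      simp [PySem.List.pyRange_one_eq_nil]
    simp [this, gaps, segLens]
  | cons y ys ih =>
    intro x
    rw [breaks_cons]
    have hlen : ((x :: y :: ys).length : Int) = ((y :: ys).length : Int) + 1 := by simp
    by_cases h : x ≥ y
    · have h' : ¬ x < y := by omega
      rw [hlen, if_pos h]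
      simp only [List.cons_append, List.nil_append, gaps]
      have hs := gaps_shift (breaks (y :: ys)) 0 ((y :: ys).length : Int)
      simp only [zero_add] at hs
      rw [hs, ih y]
      simp [segLens, h']
    · have h' : x < y := by omega
      rw [hlen, if_neg h]
      simp only [List.nil_append]
      rw [gaps_inc, ih y]
      simp only [segLens, if_pos h']
      rw [segLens_inc ys y 1]

-- ===== VERDICT =====
theorem maxSeq_spec : Claim_equal_maxSeq := by
  intro list _
  unfold Spec_maxSeq
  cases list with
  | nil => rfl
  | cons x xs =>
    -- A side
    have hflag : (List.range ((x :: xs).length + 1)).map (fun _ => (0 : Int))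
        = List.replicate ((x :: xs).length + 1) 0 := by
      simp [List.map_const']
    have hinv := maxSeq_inv (x :: xs) (x :: xs).length le_rfl
    simp only [List.take_length, Nat.sub_self, List.replicate_zero, List.append_nil] at hinv
    have hA : maxSeq (x :: xs) = segMax x 1 xs := by
      unfold maxSeq
      simp only [hflag, if_neg (List.cons_ne_nil x xs), hinv, PySem.List.max?_id_cons]
      rw [RS_first]
      simp only [List.foldl_cons, show max (0 : Int) 1 = 1 by omega]
      rw [RS_foldl_max]
    -- B side
    have hB : maxSeq_alt (x :: xs) = segMax x 1 xs := by
      unfold maxSeq_alt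
      rw [if_neg (List.cons_ne_nil x xs)]
      have hz := zip_diffs_eq_gaps (breaks (x :: xs)) 0 ((x :: xs).length : Int)
      simp only [List.tail_cons] at hz ⊢
      rw [show ((PySem.List.pyRange 1 ((x :: xs).length : Int) 1).filter
            (fun i => decide (PySem.List.pyGetD (x :: xs) (i - 1) 0 ≥ PySem.List.pyGetD (x :: xs) i 0)))
          = breaks (x :: xs) from rfl]
      rw [hz, breaks_gaps xs x]
      cases hL : segLens x 1 xs with
      | nil => exact absurd hL (segLens_ne_nil xs x 1)
      | cons d r =>
        rw [PySem.List.max?_id_cons]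
        have := segLens_max xs x 1
        rw [hL] at this
        simp only [List.headI_cons, List.tail_cons] at this
        rw [this]
    rw [hA, hB]
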